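-- pv_equiv track=rewrite | github.com/guige2023/rabai_autoclick | actions/fractions4_action.py | copeland_winner
-- ===== SOURCE A (Python) =====
-- from typing import Sequence
--
-- def copeland_winner(ballots: Sequence[Sequence[str]]) -> str | None:
--     """Copeland's method pairwise comparison winner.
--
--     Args:
--         ballots: List of ranked ballots.
--
--     Returns:
--         Winner name or None.
--     """
--     from collections import defaultdict
--     candidates = set()
--     for ballot in ballots:
--         candidates.update(ballot)
--     wins = defaultdict(int)
--     for ballot in ballots:
--         for i, a in enumerate(ballot):
--             for b in ballot[i + 1:]:
--                 wins[a] += 1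
--                 wins[b] -= 1
--     if not wins:
--         return None
--     return max(wins, key=wins.get)
-- ===== SOURCE B (Python) =====
-- def copeland_winner(ballots):
--     """Copeland's method pairwise comparison winner (single pass, closed-form
--     positional contribution (L-1-2*i) per occurrence)."""
--     scores = {}
--     for ballot in ballots:
--         n = len(ballot)
--         if n < 2:
--             continue
--         for i, c in enumerate(ballot):
--             scores[c] = scores.get(c, 0) + (n - 1 - 2 * i)
--     if not scores:
--         return None
--     return max(scores, key=scores.get)
-- ===== Notes on version B (the rewrite author's own statement) =====
-- stated objective: faster
-- what changed: Replaces A's per-ballot nested pairwise loop (every pair gets +1/-1) by a single pass per ballot that adds the closed-form positional contribution (L-1-2i) for the candidate at index i, dropping the inner slice scan.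
import Mathlib
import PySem

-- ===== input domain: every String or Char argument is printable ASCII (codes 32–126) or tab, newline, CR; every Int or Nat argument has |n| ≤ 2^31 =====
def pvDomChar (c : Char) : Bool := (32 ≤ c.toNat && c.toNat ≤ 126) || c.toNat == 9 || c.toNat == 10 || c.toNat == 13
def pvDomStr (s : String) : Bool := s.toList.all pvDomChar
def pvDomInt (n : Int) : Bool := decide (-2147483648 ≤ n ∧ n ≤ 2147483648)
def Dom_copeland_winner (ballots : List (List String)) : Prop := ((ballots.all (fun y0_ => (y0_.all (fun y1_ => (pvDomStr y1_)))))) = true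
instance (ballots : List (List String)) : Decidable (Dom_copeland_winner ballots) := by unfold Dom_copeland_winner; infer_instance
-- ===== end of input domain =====

-- B replaces A's per-ballot pairwise double loop by the closed-form positional
-- contribution (L-1-2i) per candidate occurrence, one pass per ballot.

-- ===== PORT A =====
def copeland_winner (ballots : List (List String)) : Option String :=
  let _candidates : PySem.Set String :=
    ballots.foldl (fun s ballot => PySem.Set.update s ballot) PySem.Set.empty
  let wins : PySem.Dict String Int :=
    ballots.foldl (fun w ballot =>
      (PySem.List.enumerate ballot).foldl (fun w p =>
        (PySem.List.slice ballot (some (p.1 + 1)) none).foldl (fun w b =>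
          (w.modify p.2 0 (· + 1)).modify b 0 (· - 1)) w) w)
      PySem.Dict.empty
  if wins.size = 0 then none
  else PySem.List.max? wins.keys (fun k => wins.getD k 0)

-- ===== PORT B =====
def copeland_winner_alt (ballots : List (List String)) : Option String :=
  let scores : PySem.Dict String Int :=
    ballots.foldl (fun s ballot =>
      let n : Int := ballot.length
      if n < 2 then s
      else (PySem.List.enumerate ballot).foldl
        (fun s p => s.insert p.2 (s.getD p.2 0 + (n - 1 - 2 * p.1))) s)
      PySem.Dict.empty
  if scores.size = 0 then none
  else PySem.List.max? scores.keys (fun k => scores.getD k 0)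

-- ===== PRECONDITION & SPEC =====
def Spec_copeland_winner (ballots : List (List String)) (out : Option String) : Prop := out = copeland_winner_alt ballots
instance (ballots : List (List String)) (out : Option String) : Decidable (Spec_copeland_winner ballots out) := by unfold Spec_copeland_winner; infer_instance

-- ===== CLAIM (what is proved, stated in full; the proofs are below) =====
def Claim_equal_copeland_winner : Prop := ∀ (ballots : List (List String)), Dom_copeland_winner ballots → Spec_copeland_winner ballots (copeland_winner ballots)

-- ===== LEMMAS AND PROOFS =====


def pvUpd (k : String) (v : Int) (l : List (String × Int)) : List (String × Int) :=
  l.map (fun p => if p.1 == k then (k, v) else p)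

theorem pvAny_pvUpd (k k' : String) (v : Int) (l : List (String × Int)) :
    ((pvUpd k v l).any (fun p => p.1 == k')) = (l.any (fun p => p.1 == k')) := by
  induction l with
  | nil => rfl
  | cons p rest ih =>
    simp only [pvUpd, List.map_cons, List.any_cons] at ih ⊢
    rw [ih]
    by_cases h : p.1 = k
    · simp [h]
    · simp [h]

theorem pvUpd_of_not_contains (k : String) (v : Int) (l : List (String × Int))
    (h : (l.any (fun p => p.1 == k)) = false) : pvUpd k v l = l := by
  induction l with
  | nil => rfl
  | cons p rest ih =>
    simp only [List.any_cons, Bool.or_eq_false_iff, beq_eq_false_iff_ne, ne_eq] at h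
    simp only [pvUpd, List.map_cons] at ih ⊢
    rw [if_neg (by simpa using h.1), ih h.2]

theorem pvUpd_pvUpd_same (k : String) (a b : Int) (l : List (String × Int)) :
    pvUpd k b (pvUpd k a l) = pvUpd k b l := by
  induction l with
  | nil => rfl
  | cons p rest ih =>
    simp only [pvUpd, List.map_cons] at ih ⊢
    rw [ih]
    by_cases h : p.1 = k
    · simp [h]
    · simp [h]

theorem pvUpd_comm (k k' : String) (a b : Int) (hne : k ≠ k') (l : List (String × Int)) :
    pvUpd k' b (pvUpd k a l) = pvUpd k a (pvUpd k' b l) := by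
  induction l with
  | nil => rfl
  | cons p rest ih =>
    simp only [pvUpd, List.map_cons] at ih ⊢
    rw [ih]
    by_cases h : p.1 = k
    · simp [h, hne]
    · by_cases h2 : p.1 = k'
      · simp [h2, Ne.symm hne]
      · simp [h, h2]

theorem pvContains_eq (d : PySem.Dict String Int) (k : String) :
    d.contains k = d.items.any (fun p => p.1 == k) := by
  obtain ⟨items⟩ := d; rfl

theorem pvInsert_eq_upd (d : PySem.Dict String Int) (k : String) (v : Int)
    (h : d.contains k = true) : d.insert k v = ⟨pvUpd k v d.items⟩ := by
  rw [pvContains_eq] at h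
  simp [PySem.Dict.insert, pvContains_eq, h, pvUpd]

theorem pvInsert_eq_append (d : PySem.Dict String Int) (k : String) (v : Int)
    (h : d.contains k = false) : d.insert k v = ⟨d.items ++ [(k, v)]⟩ := by
  rw [pvContains_eq] at h
  simp [PySem.Dict.insert, pvContains_eq, h]

theorem pvInsert_insert_same (d : PySem.Dict String Int) (k : String) (a b : Int) :
    (d.insert k a).insert k b = d.insert k b := by
  by_cases h : d.contains k = true
  · have h1 := pvInsert_eq_upd d k a h
    have hc : (d.insert k a).contains k = true := by
      rw [h1, pvContains_eq]; simpa [pvAny_pvUpd, pvContains_eq] using h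
    rw [pvInsert_eq_upd _ k b hc, h1, pvInsert_eq_upd d k b h]
    simp [pvUpd_pvUpd_same]
  · have h' : d.contains k = false := by revert h; cases d.contains k <;> simp
    have h1 := pvInsert_eq_append d k a h'
    have hc : (d.insert k a).contains k = true := by
      rw [h1, pvContains_eq]; simp
    rw [pvInsert_eq_upd _ k b hc, h1, pvInsert_eq_append d k b h']
    have hnot : pvUpd k b d.items = d.items :=
      pvUpd_of_not_contains k b d.items (by rw [pvContains_eq] at h'; exact h')
    simp [pvUpd, List.map_append] at hnot ⊢
    simpa [pvUpd] using hnot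

theorem pvInsert_insert_comm (d : PySem.Dict String Int) (k k' : String) (a b : Int)
    (hne : k ≠ k') (h : d.contains k = true) :
    (d.insert k a).insert k' b = (d.insert k' b).insert k a := by
  have hka := pvInsert_eq_upd d k a h
  by_cases h2 : d.contains k' = true
  · have hkb := pvInsert_eq_upd d k' b h2
    have hc1 : (PySem.Dict.mk (pvUpd k a d.items) : PySem.Dict String Int).contains k' = true := by
      rw [pvContains_eq]; simpa [pvAny_pvUpd, pvContains_eq] using h2
    have hc2 : (PySem.Dict.mk (pvUpd k' b d.items) : PySem.Dict String Int).contains k = true := by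
      rw [pvContains_eq]; simpa [pvAny_pvUpd, pvContains_eq] using h
    rw [hka, hkb, pvInsert_eq_upd _ k' b hc1, pvInsert_eq_upd _ k a hc2]
    simp [pvUpd_comm k k' a b hne]
  · have h2' : d.contains k' = false := by revert h2; cases d.contains k' <;> simp
    have hkb := pvInsert_eq_append d k' b h2'
    have hc1 : (PySem.Dict.mk (pvUpd k a d.items) : PySem.Dict String Int).contains k' = false := by
      rw [pvContains_eq]; simpa [pvAny_pvUpd, pvContains_eq] using h2'
    have hc2 : (PySem.Dict.mk (d.items ++ [(k', b)]) : PySem.Dict String Int).contains k = true := by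
      rw [pvContains_eq] at h ⊢
      simp only [List.any_append, h, Bool.true_or]
    rw [hka, hkb, pvInsert_eq_append _ k' b hc1, pvInsert_eq_upd _ k a hc2]
    simp [pvUpd, Ne.symm hne]

def pvBump (d : PySem.Dict String Int) (k : String) (v : Int) : PySem.Dict String Int :=
  d.insert k (d.getD k 0 + v)

def pvBumps (d : PySem.Dict String Int) (ps : List (String × Int)) : PySem.Dict String Int :=
  ps.foldl (fun d p => pvBump d p.1 p.2) d

theorem pvContains_pvBump (d : PySem.Dict String Int) (k k' : String) (v : Int) :
    (pvBump d k v).contains k' = (k' == k || d.contains k') :=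
  PySem.Dict.contains_insert d k k' _

theorem pvBump_pvBump_same (d : PySem.Dict String Int) (k : String) (v w : Int) :
    pvBump (pvBump d k v) k w = pvBump d k (v + w) := by
  simp [pvBump, PySem.Dict.getD, PySem.Dict.get?_insert_self, pvInsert_insert_same, add_assoc]

theorem pvBump_comm (d : PySem.Dict String Int) (k k' : String) (v w : Int)
    (h : d.contains k = true) :
    pvBump (pvBump d k v) k' w = pvBump (pvBump d k' w) k v := by
  by_cases he : k' = k
  · subst he; rw [pvBump_pvBump_same, pvBump_pvBump_same, add_comm]
  · simp only [pvBump, PySem.Dict.getD]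
    rw [PySem.Dict.get?_insert_of_ne d _ he, PySem.Dict.get?_insert_of_ne d _ (Ne.symm he)]
    exact pvInsert_insert_comm d k k' _ _ (Ne.symm he) h

theorem pvBumps_pvBump (d : PySem.Dict String Int) (k : String) (w : Int)
    (ps : List (String × Int)) (h : d.contains k = true) :
    pvBumps (pvBump d k w) ps = pvBump (pvBumps d ps) k w := by
  induction ps generalizing d with
  | nil => rfl
  | cons p rest ih =>
    simp only [pvBumps, List.foldl_cons] at ih ⊢
    rw [pvBump_comm d k p.1 w p.2 h]
    exact ih (pvBump d p.1 p.2) (by rw [pvContains_pvBump]; simp [h])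

theorem pvTwoPass (ps qs : List (String × Int)) (d : PySem.Dict String Int)
    (h : ps.map Prod.fst = qs.map Prod.fst) :
    pvBumps (pvBumps d ps) qs = pvBumps d (List.zipWith (fun p q => (p.1, p.2 + q.2)) ps qs) := by
  induction ps generalizing qs d with
  | nil =>
    have : qs = [] := by simpa using (List.map_eq_nil_iff.mp h.symm)
    simp [this, pvBumps]
  | cons p ps' ih =>
    cases qs with
    | nil => simp at h
    | cons q qs' =>
      simp only [List.map_cons, List.cons.injEq] at h
      obtain ⟨hk, ht⟩ := h
      simp only [pvBumps, List.foldl_cons, List.zipWith_cons_cons] at ih ⊢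
      have hcont : (pvBump d p.1 p.2).contains q.1 = true := by
        rw [pvContains_pvBump]; simp [hk]
      have h1 : ps'.foldl (fun d p => pvBump d p.1 p.2) (pvBump (pvBump d p.1 p.2) q.1 q.2)
          = pvBump (ps'.foldl (fun d p => pvBump d p.1 p.2) (pvBump d p.1 p.2)) q.1 q.2 := by
        simpa [pvBumps] using pvBumps_pvBump (pvBump d p.1 p.2) q.1 q.2 ps' hcont
      rw [← h1]
      have h2 : pvBump (pvBump d p.1 p.2) q.1 q.2 = pvBump d p.1 (p.2 + q.2) := by
        rw [← hk, pvBump_pvBump_same]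
      rw [h2]
      exact ih qs' (pvBump d p.1 (p.2 + q.2)) ht

def pvRecA : List String → PySem.Dict String Int → PySem.Dict String Int
  | [], w => w
  | c :: rest, w => pvRecA rest (rest.foldl (fun w b => pvBump (pvBump w c 1) b (-1)) w)

def pvStepB (w : PySem.Dict String Int) (ballot : List String) : PySem.Dict String Int :=
  if (ballot.length : Int) < 2 then w
  else (PySem.List.enumerate ballot).foldl
    (fun s p => pvBump s p.2 ((ballot.length : Int) - 1 - 2 * p.1)) w

theorem pvInner_reorg (bs : List String) (b c : String) (d : PySem.Dict String Int) :
    (b :: bs).foldl (fun w x => pvBump (pvBump w c 1) x (-1)) d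
      = bs.foldl (fun w x => pvBump w x (-1))
          (pvBump (pvBump d c ((bs.length : Int) + 1)) b (-1)) := by
  induction bs generalizing d b with
  | nil => simp [List.foldl_cons]
  | cons b2 bs' ih =>
    rw [List.foldl_cons, ih (d := pvBump (pvBump d c 1) b (-1)) (b := b2),
        List.foldl_cons (f := fun w x => pvBump w x (-1))]
    have hc : (pvBump d c 1).contains c = true := by rw [pvContains_pvBump]; simp
    have key : pvBump (pvBump (pvBump (pvBump d c 1) b (-1)) c ((bs'.length : Int) + 1)) b2 (-1)
        = pvBump (pvBump (pvBump d c (((b2 :: bs').length : Int) + 1)) b (-1)) b2 (-1) := by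
      rw [(pvBump_comm (pvBump d c 1) c b ((bs'.length : Int) + 1) (-1) hc).symm,
          pvBump_pvBump_same]
      have harith : (1 : Int) + ((bs'.length : Int) + 1) = ((b2 :: bs').length : Int) + 1 := by
        simp [List.length_cons]; ring
      rw [harith]
    rw [key]

theorem pvCoeff_merge (rest : List String) (m : Int) : ∀ (s : Int),
    List.zipWith (fun p q => (p.1, p.2 + q.2))
      (rest.map (fun b => (b, (-1 : Int))))
      ((PySem.List.enumerate rest s).map (fun p => (p.2, m - 1 - 2 * p.1)))
    = (PySem.List.enumerate rest (s + 1)).map (fun p => (p.2, (m + 1) - 1 - 2 * p.1)) := by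
  induction rest with
  | nil => intro s; simp [PySem.List.enumerate]
  | cons x xs ih =>
    intro s
    rw [PySem.List.enumerate_cons, PySem.List.enumerate_cons]
    simp only [List.map_cons, List.zipWith_cons_cons, ih (s + 1)]
    have : (-1 : Int) + (m - 1 - 2 * s) = (m + 1) - 1 - 2 * (s + 1) := by ring
    rw [this]


theorem pvFoldl_bumps_neg (rest : List String) (X : PySem.Dict String Int) :
    rest.foldl (fun w x => pvBump w x (-1)) X
      = pvBumps X (rest.map (fun x => (x, (-1 : Int)))) := by
  simp [pvBumps, List.foldl_map]

theorem pvFoldl_bumps_enum (rest : List String) (s m : Int) (X : PySem.Dict String Int) :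
    (PySem.List.enumerate rest s).foldl (fun w p => pvBump w p.2 (m - 1 - 2 * p.1)) X
      = pvBumps X ((PySem.List.enumerate rest s).map (fun p => (p.2, m - 1 - 2 * p.1))) := by
  simp [pvBumps, List.foldl_map]

theorem pvE (c : String) (rest : List String) (d : PySem.Dict String Int) :
    (PySem.List.enumerate rest).foldl
      (fun w p => pvBump w p.2 ((rest.length : Int) - 1 - 2 * p.1))
      (rest.foldl (fun w x => pvBump w x (-1)) (pvBump d c (rest.length : Int)))
  = (PySem.List.enumerate (c :: rest)).foldl
      (fun w p => pvBump w p.2 (((c :: rest).length : Int) - 1 - 2 * p.1)) d := by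
  rw [pvFoldl_bumps_neg, pvFoldl_bumps_enum]
  rw [pvTwoPass _ _ _ (by
    simp only [List.map_map, Function.comp_def]
    exact (congrArg id (by simp [PySem.List.map_snd_enumerate])))]
  rw [pvCoeff_merge rest (rest.length : Int) 0]
  rw [PySem.List.enumerate_cons, List.foldl_cons]
  have hcl : (((c :: rest).length : Int)) = (rest.length : Int) + 1 := by simp
  simp only [hcl]
  rw [pvFoldl_bumps_enum]
  congr 2
  ring

theorem pvRecA_eq_stepB (ballot : List String) : ∀ (d : PySem.Dict String Int),
    pvRecA ballot d = pvStepB d ballot := by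
  induction ballot with
  | nil => intro d; simp [pvRecA, pvStepB]
  | cons c rest ih =>
    intro d
    cases rest with
    | nil => simp [pvRecA, pvStepB]
    | cons b bs =>
      rw [show pvRecA (c :: b :: bs) d
            = pvRecA (b :: bs) ((b :: bs).foldl (fun w x => pvBump (pvBump w c 1) x (-1)) d) from rfl,
          ih, pvInner_reorg]
      have hlen : ((bs.length : Int) + 1) = (((b :: bs).length : Int)) := by simp
      rw [hlen]
      have hneg : bs.foldl (fun w x => pvBump w x (-1))
            (pvBump (pvBump d c (((b :: bs).length : Int))) b (-1))
          = (b :: bs).foldl (fun w x => pvBump w x (-1)) (pvBump d c (((b :: bs).length : Int))) := rfl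
      rw [hneg]
      cases bs with
      | nil =>
        simp [pvStepB, PySem.List.enumerate]
      | cons b2 bs' =>
        have hm2 : ¬ ((((b :: b2 :: bs').length : Int)) < 2) := by simp
        have hn2 : ¬ ((((c :: b :: b2 :: bs').length : Int)) < 2) := by simp; omega
        simp only [pvStepB, if_neg hm2, if_neg hn2]
        exact pvE c (b :: b2 :: bs') d

theorem pvModify_add (d : PySem.Dict String Int) (k : String) :
    d.modify k 0 (· + 1) = pvBump d k 1 := rfl

theorem pvModify_sub (d : PySem.Dict String Int) (k : String) :
    d.modify k 0 (· - 1) = pvBump d k (-1) := by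
  simp [PySem.Dict.modify, pvBump, sub_eq_add_neg]

theorem pvA_loop (cur : List String) : ∀ (pre : List String) (d : PySem.Dict String Int),
    (PySem.List.enumerate cur (pre.length : Int)).foldl
      (fun w p => (PySem.List.slice (pre ++ cur) (some (p.1 + 1)) none).foldl
        (fun w b => (w.modify p.2 0 (· + 1)).modify b 0 (· - 1)) w) d
    = pvRecA cur d := by
  induction cur with
  | nil => intro pre d; simp [PySem.List.enumerate, pvRecA]
  | cons c rest ih =>
    intro pre d
    rw [PySem.List.enumerate_cons, List.foldl_cons]
    have hsl : PySem.List.slice (pre ++ c :: rest) (some ((pre.length : Int) + 1)) none = rest := by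
      have h1 : ((pre.length : Int) + 1) = (((pre.length + 1 : Nat)) : Int) := by push_cast; ring
      rw [h1, PySem.List.slice_from_natCast]
      rw [show pre.length + 1 = (pre ++ [c]).length by simp]
      rw [show pre ++ c :: rest = (pre ++ [c]) ++ rest by simp]
      exact List.drop_left
    rw [hsl]
    have h2 : ((pre.length : Int) + 1) = (((pre ++ [c]).length : Nat) : Int) := by simp
    rw [h2, show pre ++ c :: rest = (pre ++ [c]) ++ rest by simp, ih (pre ++ [c])]
    simp only [pvModify_add, pvModify_sub]
    rfl

theorem pvDict_eq (ballots : List (List String)) :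
    ballots.foldl (fun w ballot =>
      (PySem.List.enumerate ballot).foldl (fun w p =>
        (PySem.List.slice ballot (some (p.1 + 1)) none).foldl (fun w b =>
          (w.modify p.2 0 (· + 1)).modify b 0 (· - 1)) w) w)
      PySem.Dict.empty
    = ballots.foldl (fun s ballot =>
      let n : Int := ballot.length
      if n < 2 then s
      else (PySem.List.enumerate ballot).foldl
        (fun s p => s.insert p.2 (s.getD p.2 0 + (n - 1 - 2 * p.1))) s)
      PySem.Dict.empty := by
  have hstep : (fun (w : PySem.Dict String Int) (ballot : List String) =>
      (PySem.List.enumerate ballot).foldl (fun w p =>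
        (PySem.List.slice ballot (some (p.1 + 1)) none).foldl (fun w b =>
          (w.modify p.2 0 (· + 1)).modify b 0 (· - 1)) w) w)
    = (fun (s : PySem.Dict String Int) (ballot : List String) =>
      let n : Int := ballot.length
      if n < 2 then s
      else (PySem.List.enumerate ballot).foldl
        (fun s p => s.insert p.2 (s.getD p.2 0 + (n - 1 - 2 * p.1))) s) := by
    funext w ballot
    have h1 := pvA_loop ballot [] w
    simp only [List.nil_append, List.length_nil, Nat.cast_zero] at h1
    rw [h1, pvRecA_eq_stepB]
    rfl
  rw [hstep]


-- ===== VERDICT (by name: the statement is the Claim_ definition above) =====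
theorem copeland_winner_spec : Claim_equal_copeland_winner := by
  intro ballots _
  unfold Spec_copeland_winner copeland_winner copeland_winner_alt
  rw [pvDict_eq]
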